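-- pv_equiv track=rewrite | github.com/qwestduck/rapidfire-telegram | telegram.py | buffered_truncate
-- ===== SOURCE A (Python) =====
-- def buffered_truncate(buffer, buffer_len, words):
--     consumed = 0
--
--     for w in words:
--         if (len(buffer) == 0) and (len(words[consumed]) <= buffer_len):
--             buffer = words[consumed]
--             consumed = consumed + 1
--         elif len(buffer) + len(words[consumed]) + 1 <= buffer_len:
--             buffer = buffer + " " + words[consumed]
--             consumed = consumed + 1
--         else:
--             break
--
--     return (buffer, consumed)
-- ===== SOURCE B (Python) =====
-- def buffered_truncate(buffer, buffer_len, words):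
--     # Count how many words fit using only cumulative lengths, then build the
--     # result once with a single join.
--     total = len(buffer)
--     k = 0
--     for w in words:
--         cost = len(w) if total == 0 else len(w) + 1
--         if total + cost > buffer_len:
--             break
--         total += cost
--         k += 1
--     pieces = ([buffer] if buffer else []) + words[:k]
--     return (" ".join(pieces), k)
-- ===== Notes on version B (the rewrite author's own statement) =====
-- stated objective: alternative
-- what changed: Instead of growing the buffer by repeated string concatenation inside the greedy loop, B counts how many words fit using only cumulative integer lengths and builds the result once with a single ' '.join; Pre_ excludes calls with an empty buffer whose word list starts with an empty word, where A glues leading empty words without separators (the buffer stays empty) while B's single join puts a separator per word - both are defensible on that degenerate input.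
-- outside the precondition, e.g. on buffered_truncate('', 5, ['', 'a']): A returns ('a', 2), B returns (' a', 2)
import Mathlib
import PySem

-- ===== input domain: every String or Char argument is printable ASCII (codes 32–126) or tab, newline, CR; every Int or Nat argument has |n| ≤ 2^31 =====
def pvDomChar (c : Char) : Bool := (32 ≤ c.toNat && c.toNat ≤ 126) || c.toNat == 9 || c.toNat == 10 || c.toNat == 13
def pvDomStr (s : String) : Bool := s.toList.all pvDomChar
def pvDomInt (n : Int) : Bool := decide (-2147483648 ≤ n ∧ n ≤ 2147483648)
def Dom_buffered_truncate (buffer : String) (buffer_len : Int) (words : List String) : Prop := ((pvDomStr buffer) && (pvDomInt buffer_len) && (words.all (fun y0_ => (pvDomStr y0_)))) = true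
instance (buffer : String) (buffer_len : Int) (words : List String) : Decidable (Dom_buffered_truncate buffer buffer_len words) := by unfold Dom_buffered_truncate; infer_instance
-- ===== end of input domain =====

-- B replaces A's repeated string concatenation by arithmetic counting of how many
-- words fit (cumulative lengths) followed by a single join (objective: alternative).

-- ===== PORT A =====
-- A's loop: 'for w in words' that actually reads words[consumed]; we iterate the
-- list for the trip count and index with pyGet? exactly as Python does.
def aLoop (wordsAll : List String) (buffer_len : Int) : List String → String → Int → String × Int
  | [], buffer, consumed => (buffer, consumed)
  | _ :: rest, buffer, consumed =>
    match PySem.List.pyGet? wordsAll consumed with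
    | none => (buffer, consumed)  -- IndexError; unreachable: consumed < len(wordsAll) at every access
    | some wc =>
      if PySem.Str.len buffer = 0 ∧ PySem.Str.len wc ≤ buffer_len then
        aLoop wordsAll buffer_len rest wc (consumed + 1)
      else if PySem.Str.len buffer + PySem.Str.len wc + 1 ≤ buffer_len then
        -- buffer = buffer + " " + words[consumed]  (exact concatenation on code points)
        aLoop wordsAll buffer_len rest (String.ofList (buffer.toList ++ ' ' :: wc.toList)) (consumed + 1)
      else (buffer, consumed)

def buffered_truncate (buffer : String) (buffer_len : Int) (words : List String) : String × Int :=
  aLoop words buffer_len words buffer 0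

-- ===== PORT B =====
-- for w in words: cost = len(w) if total == 0 else len(w)+1; if total+cost > bl: break; …
def btCount (buffer_len : Int) : List String → Int → Int → Int
  | [], _, k => k
  | w :: rs, total, k =>
    -- cost = len(w) if total == 0 else len(w) + 1  (inlined)
    if buffer_len < total + (if total = 0 then PySem.Str.len w else PySem.Str.len w + 1) then k
    else btCount buffer_len rs (total + (if total = 0 then PySem.Str.len w else PySem.Str.len w + 1)) (k + 1)

def buffered_truncate_alt (buffer : String) (buffer_len : Int) (words : List String) : String × Int :=
  let k := btCount buffer_len words (PySem.Str.len buffer) 0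
  -- pieces = ([buffer] if buffer else []) + words[:k]
  let pieces := (if buffer = "" then [] else [buffer]) ++ PySem.List.slice words none (some k)
  (PySem.Str.join " " pieces, k)

-- ===== PRECONDITION & SPEC =====
-- Pre_ excludes calls with an empty buffer whose word list starts with an empty word:
-- there A glues leading empty words without separators (the buffer stays empty) while
-- B's single join puts a separator per word — both behaviours are defensible on that
-- degenerate input, so it is carved out rather than mimicked.
def Pre_buffered_truncate (buffer : String) (buffer_len : Int) (words : List String) : Prop :=
  ¬ (buffer = "" ∧ words.head? = some "")
instance (buffer : String) (buffer_len : Int) (words : List String) : Decidable (Pre_buffered_truncate buffer buffer_len words) := by unfold Pre_buffered_truncate; infer_instance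

def pvWitness_buffered_truncate : String × Int × List String := ("", 7, ["ab", "c", "de"])

def Spec_buffered_truncate (buffer : String) (buffer_len : Int) (words : List String) (out : String × Int) : Prop := out = buffered_truncate_alt buffer buffer_len words
instance (buffer : String) (buffer_len : Int) (words : List String) (out : String × Int) : Decidable (Spec_buffered_truncate buffer buffer_len words out) := by unfold Spec_buffered_truncate; infer_instance

-- ===== CLAIM (what is proved, stated in full; the proofs are below) =====
def Claim_equal_buffered_truncate : Prop := ∀ (buffer : String) (buffer_len : Int) (words : List String), Dom_buffered_truncate buffer buffer_len words → Pre_buffered_truncate buffer buffer_len words → Spec_buffered_truncate buffer buffer_len words (buffered_truncate buffer buffer_len words)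

-- ===== LEMMAS AND PROOFS =====

-- A's loop indexed by 'consumed' is the structural greedy over the remaining words.
def sgreedy (buffer_len : Int) : List String → String → Int → String × Int
  | [], buffer, c => (buffer, c)
  | w :: rest, buffer, c =>
    if PySem.Str.len buffer = 0 ∧ PySem.Str.len w ≤ buffer_len then
      sgreedy buffer_len rest w (c + 1)
    else if PySem.Str.len buffer + PySem.Str.len w + 1 ≤ buffer_len then
      sgreedy buffer_len rest (String.ofList (buffer.toList ++ ' ' :: w.toList)) (c + 1)
    else (buffer, c)

lemma aLoop_eq_sgreedy (bl : Int) :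
    ∀ (rest p : List String) (buffer : String),
      aLoop (p ++ rest) bl rest buffer (p.length : Int) = sgreedy bl rest buffer (p.length : Int) := by
  intro rest
  induction rest with
  | nil => intro p buffer; simp [aLoop, sgreedy]
  | cons w rest ih =>
    intro p buffer
    rw [aLoop, sgreedy, PySem.List.pyGet?_append_length]
    dsimp only
    split_ifs with h1 h2
    · have h3 := ih (p ++ [w]) w
      simp only [List.append_assoc, List.singleton_append, List.length_append,
        List.length_cons, List.length_nil] at h3
      push_cast at h3
      exact h3
    · have h3 := ih (p ++ [w]) (String.ofList (buffer.toList ++ ' ' :: w.toList))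
      simp only [List.append_assoc, List.singleton_append, List.length_append,
        List.length_cons, List.length_nil] at h3
      push_cast at h3
      exact h3
    · rfl

lemma btCount_shift (bl : Int) :
    ∀ (ws : List String) (t k : Int), btCount bl ws t k = k + btCount bl ws t 0 := by
  intro ws
  induction ws with
  | nil => intro t k; simp [btCount]
  | cons w ws ih =>
    intro t k
    rw [btCount, btCount]
    split_ifs with h0 h1 h1
    · simp
    · rw [ih _ (k + 1), ih _ (0 + 1)]; ring
    · simp
    · rw [ih _ (k + 1), ih _ (0 + 1)]; ring

lemma btCount_nonneg (bl : Int) (ws : List String) (t : Int) : 0 ≤ btCount bl ws t 0 := by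
  induction ws generalizing t with
  | nil => simp [btCount]
  | cons w ws ih =>
    rw [btCount]
    split_ifs with h0 h1 h1
    · omega
    · rw [btCount_shift]; have := ih (t + PySem.Str.len w); omega
    · omega
    · rw [btCount_shift]; have := ih (t + (PySem.Str.len w + 1)); omega

lemma len_zero_iff (s : String) : PySem.Str.len s = 0 ↔ s = "" := by
  rw [PySem.Str.len_eq]
  constructor
  · intro h
    have : s.toList = [] := List.eq_nil_of_length_eq_zero (by exact_mod_cast h)
    exact String.toList_inj.mp (by simpa using this)
  · intro h; subst h; decide

lemma len_nonneg (s : String) : 0 ≤ PySem.Str.len s := by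
  rw [PySem.Str.len_eq]; positivity

lemma len_ofList_append (a : String) (w : String) :
    PySem.Str.len (String.ofList (a.toList ++ ' ' :: w.toList)) = PySem.Str.len a + PySem.Str.len w + 1 := by
  simp [PySem.Str.len_eq]
  ring

-- joining after gluing the separator onto the head is the same join
lemma join_glue (a b : List Char) (l : List (List Char)) :
    PySem.Chars.join [' '] ((a ++ ' ' :: b) :: l) = PySem.Chars.join [' '] (a :: b :: l) := by
  cases l with
  | nil => simp [PySem.Chars.join_singleton, PySem.Chars.join_cons_cons]
  | cons q l => simp [PySem.Chars.join_cons_cons]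

lemma str_eq_of_toList (s t : String) (h : s.toList = t.toList) : s = t :=
  String.toList_inj.mp h

-- greedy from a NONEMPTY buffer = count-then-join
lemma sgreedy_nonempty (bl : Int) :
    ∀ (ws : List String) (buffer : String) (c : Int), PySem.Str.len buffer ≠ 0 →
      sgreedy bl ws buffer c =
        (PySem.Str.join " " (buffer :: ws.take (btCount bl ws (PySem.Str.len buffer) 0).toNat),
         c + btCount bl ws (PySem.Str.len buffer) 0) := by
  intro ws
  induction ws with
  | nil =>
    intro buffer c h
    rw [sgreedy]
    refine Prod.ext ?_ (by simp [btCount])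
    apply str_eq_of_toList
    simp [btCount, PySem.Str.toList_join, PySem.Chars.join_singleton]
  | cons w ws ih =>
    intro buffer c h
    rw [sgreedy]
    rw [if_neg (by exact fun hc => h hc.1)]
    have hcost : btCount bl (w :: ws) (PySem.Str.len buffer) 0
        = if bl < PySem.Str.len buffer + (PySem.Str.len w + 1) then 0
          else btCount bl ws (PySem.Str.len buffer + (PySem.Str.len w + 1)) 1 := by
      rw [btCount, if_neg h]
      norm_num
    by_cases h2 : PySem.Str.len buffer + PySem.Str.len w + 1 ≤ bl
    · rw [if_pos h2]
      have hlen := len_ofList_append buffer w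
      have hne : PySem.Str.len (String.ofList (buffer.toList ++ ' ' :: w.toList)) ≠ 0 := by
        have := len_nonneg buffer; have := len_nonneg w; omega
      rw [ih _ (c + 1) hne, hlen]
      have hcnt : btCount bl (w :: ws) (PySem.Str.len buffer) 0
          = 1 + btCount bl ws (PySem.Str.len buffer + PySem.Str.len w + 1) 0 := by
        rw [hcost, if_neg (by omega), btCount_shift]
        ring_nf
      have hmn : 0 ≤ btCount bl ws (PySem.Str.len buffer + PySem.Str.len w + 1) 0 :=
        btCount_nonneg bl ws _
      refine Prod.ext ?_ ?_
      · apply str_eq_of_toList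
        have htake : (btCount bl (w :: ws) (PySem.Str.len buffer) 0).toNat
            = (btCount bl ws (PySem.Str.len buffer + PySem.Str.len w + 1) 0).toNat + 1 := by
          omega
        rw [htake]
        simp only [List.take_succ_cons]
        rw [PySem.Str.toList_join, PySem.Str.toList_join]
        rw [show (" " : String).toList = [' '] by decide]
        simp only [List.map_cons]
        rw [show (String.ofList (buffer.toList ++ ' ' :: w.toList)).toList
              = buffer.toList ++ ' ' :: w.toList by simp]
        exact join_glue buffer.toList w.toList _
      · dsimp only
        omega
    · rw [if_neg h2]
      have hcnt : btCount bl (w :: ws) (PySem.Str.len buffer) 0 = 0 := by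
        rw [hcost, if_pos (by omega)]
      refine Prod.ext ?_ (by dsimp only; omega)
      apply str_eq_of_toList
      rw [hcnt]
      simp [PySem.Str.toList_join, PySem.Chars.join_singleton]

-- ===== VERDICT (by name: the statement is the Claim_ definition above) =====
theorem buffered_truncate_spec : Claim_equal_buffered_truncate := by
  intro buffer bl words _ hpre
  show buffered_truncate buffer bl words = buffered_truncate_alt buffer bl words
  have hA : buffered_truncate buffer bl words = sgreedy bl words buffer 0 := by
    have := aLoop_eq_sgreedy bl words [] buffer
    simpa [buffered_truncate] using this
  rw [hA, buffered_truncate_alt]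
  by_cases hb : buffer = ""
  · subst hb
    cases words with
    | nil => simp [sgreedy, btCount, PySem.List.slice, PySem.Str.join]
    | cons w rest =>
      have hw : w ≠ "" := by
        intro hww; exact hpre ⟨rfl, by rw [hww]; rfl⟩
      have hwlen : PySem.Str.len w ≠ 0 := fun hh => hw ((len_zero_iff w).mp hh)
      have hwpos : 0 < PySem.Str.len w := by have := len_nonneg w; omega
      have hcnt0 : btCount bl (w :: rest) (PySem.Str.len ("" : String)) 0
          = if bl < PySem.Str.len w then 0 else btCount bl rest (PySem.Str.len w) 1 := by
        rw [show PySem.Str.len ("" : String) = 0 by decide, btCount, if_pos rfl]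
        norm_num
      rw [sgreedy]
      by_cases hfit : PySem.Str.len w ≤ bl
      · rw [if_pos ⟨by decide, hfit⟩]
        rw [sgreedy_nonempty bl rest w (0 + 1) hwlen]
        have hk : btCount bl (w :: rest) (PySem.Str.len ("" : String)) 0
            = 1 + btCount bl rest (PySem.Str.len w) 0 := by
          rw [hcnt0, if_neg (by omega), btCount_shift]
        have hmn := btCount_nonneg bl rest (PySem.Str.len w)
        rw [hk]
        rw [PySem.List.slice_to (w :: rest) (by omega)]
        refine Prod.ext ?_ (by dsimp only; omega)
        have htake : ((1 : Int) + btCount bl rest (PySem.Str.len w) 0).toNat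
            = (btCount bl rest (PySem.Str.len w) 0).toNat + 1 := by omega
        rw [htake, List.take_succ_cons]
        simp
      · rw [if_neg (by rintro ⟨-, hh⟩; exact hfit hh),
            if_neg (by rw [show PySem.Str.len ("" : String) = 0 by decide]; omega)]
        have hk : btCount bl (w :: rest) (PySem.Str.len ("" : String)) 0 = 0 := by
          rw [hcnt0, if_pos (by omega)]
        rw [hk]
        refine Prod.ext ?_ rfl
        apply str_eq_of_toList
        rw [PySem.List.slice_to (w :: rest) le_rfl]
        simp [PySem.Str.toList_join, PySem.Chars.join, List.intercalate]
  · rw [if_neg hb]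
    have hblen : PySem.Str.len buffer ≠ 0 := fun hh => hb ((len_zero_iff buffer).mp hh)
    rw [sgreedy_nonempty bl words buffer 0 hblen]
    rw [PySem.List.slice_to words (btCount_nonneg bl words (PySem.Str.len buffer))]
    refine Prod.ext ?_ (by dsimp only; ring)
    simp
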